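-- pv_equiv track=rewrite | github.com/miliar/Code_Jam_Webscraper | solutions_python/Problem_179/3479.py | get_nontrivial
-- ===== SOURCE A (Python) =====
-- import math
--
-- bases = [2, 3, 4, 5, 6, 7, 8, 9, 10]
--
-- def num_from_base(base, bits):
-- 	"""
-- 	Get the base 10 value of the given bits to the given base.
-- 	:param base: Positive integer denoting the working base.
-- 	:param bits: List of 0-s and 1-s representing the bits of the number.
-- 	:return int: Positive integer.
-- 	"""
-- 	num = 0
-- 	for i, b in enumerate(reversed(bits)):
-- 		if b == 1:
-- 			num += base ** i
-- 	return num
--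
-- def get_nontrivial(coin):
-- 	"""
-- 	Get a list of nontrivial divisor, of the jam coin, for each valid base
-- 	"""
-- 	nontrivial = list()
-- 	for base in bases:
-- 		num = num_from_base(base, coin)
-- 		if (num % 2) == 0:
-- 			nontrivial.append(2)
-- 			continue
-- 		for i in range(3, int(math.sqrt(num))+1, 2):
-- 			if (num % i) == 0:
-- 				nontrivial.append(i)
-- 				break
-- 	return nontrivial
-- ===== SOURCE B (Python) =====
-- import math
--
-- def get_nontrivial(coin):
-- 	"""
-- 	Get a list of nontrivial divisor, of the jam coin, for each valid base
-- 	"""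
-- 	# interpret the coin in every base by Horner's rule; even values are done at once,
-- 	# odd ones join a shared worklist scanned by ONE ascending pass over odd candidates
-- 	res = {}
-- 	pending = []
-- 	for idx in range(9):
-- 		base = idx + 2
-- 		num = 0
-- 		for b in coin:
-- 			num = num * base + (1 if b == 1 else 0)
-- 		if num % 2 == 0:
-- 			res[idx] = 2
-- 		else:
-- 			pending.append((idx, num, int(math.sqrt(num))))
-- 	d = 3
-- 	while pending:
-- 		nxt = []
-- 		for idx, num, r in pending:
-- 			if d > r:
-- 				pass
-- 			elif num % d == 0:
-- 				res[idx] = d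
-- 			else:
-- 				nxt.append((idx, num, r))
-- 		pending = nxt
-- 		d += 2
-- 	return [res[idx] for idx in range(9) if idx in res]
-- ===== Notes on version B (the rewrite author's own statement) =====
-- stated objective: alternative
-- what changed: B inverts A's loop nesting: it converts the coin once per base by Horner's rule (A sums per-bit powers), then runs ONE shared ascending scan over odd candidate divisors against a worklist of the still-unresolved bases (A runs an independent trial-division loop per base), recording each base's divisor in a dict and assembling the result list per base at the end.
import Mathlib
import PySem

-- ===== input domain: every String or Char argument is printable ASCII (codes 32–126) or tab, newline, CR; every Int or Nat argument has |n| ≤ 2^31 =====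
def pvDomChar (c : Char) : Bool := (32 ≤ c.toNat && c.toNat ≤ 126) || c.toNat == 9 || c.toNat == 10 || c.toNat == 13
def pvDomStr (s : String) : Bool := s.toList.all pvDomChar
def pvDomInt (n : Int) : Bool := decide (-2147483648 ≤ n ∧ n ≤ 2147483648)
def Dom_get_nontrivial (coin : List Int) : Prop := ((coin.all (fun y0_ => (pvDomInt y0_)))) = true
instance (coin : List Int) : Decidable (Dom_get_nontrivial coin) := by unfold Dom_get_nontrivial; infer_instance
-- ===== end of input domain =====

-- B inverts A's loop nesting: Horner conversion per base, then ONE shared ascending scan over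
-- odd candidate divisors with a worklist of unresolved bases, results assembled per base at the end.

-- ===== PORT A =====

-- Hand-written exact model of Python's int(math.sqrt(n)) for 0 ≤ n < 2^1023 (both sources call it):
-- round n to the nearest double (53-bit significand, round-half-even), take the correctly rounded
-- (IEEE-754) square root m·2^(h-52) with m the half-even-rounded 53-bit mantissa, floor the result.
def pyFloatSqrtFloor (n : Int) : Int :=
  if n ≤ 0 then 0 else
  let nn := n.toNat
  let L := Nat.log2 nn + 1
  let nd : Nat :=
    if L ≤ 53 then nn else
      let e := L - 53
      let q := nn / 2 ^ e
      let rem := nn % 2 ^ e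
      let half := 2 ^ (e - 1)
      let q' := if half < rem ∨ (rem = half ∧ q % 2 = 1) then q + 1 else q
      q' * 2 ^ e
  let L2 := Nat.log2 nd + 1
  let A2 := 4 * nd
  let h := (L2 - 1) / 2
  if 52 ≤ h then
    let u := h - 52
    let S := Nat.sqrt A2 / 2 ^ u
    let M := (S + 1) / 2
    let m := if (2 * M - 1) ^ 2 * 4 ^ u = A2 ∧ M % 2 = 1 then M - 1 else M
    ((m * 2 ^ u : Nat) : Int)
  else
    let v := 52 - h
    let S := Nat.sqrt (A2 * 4 ^ v)
    let M := (S + 1) / 2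
    let m := if (2 * M - 1) ^ 2 = A2 * 4 ^ v ∧ M % 2 = 1 then M - 1 else M
    ((m / 2 ^ v : Nat) : Int)

def pvBases : List Int := [2, 3, 4, 5, 6, 7, 8, 9, 10]

def num_from_base (base : Int) (bits : List Int) : Int :=
  (PySem.List.enumerate bits.reverse 0).foldl
    (fun num ib => if ib.2 = 1 then num + base ^ ib.1.toNat else num) 0

-- the inner 'for … break' loop is the first match of the range
def get_nontrivial (coin : List Int) : List Int :=
  pvBases.foldl (fun nontrivial base =>
    let num := num_from_base base coin
    if PySem.Int.mod num 2 = 0 then nontrivial ++ [2]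
    else
      match (PySem.List.pyRange 3 (pyFloatSqrtFloor num + 1) 2).find?
              (fun i => PySem.Int.mod num i == 0) with
      | some i => nontrivial ++ [i]
      | none => nontrivial) []

-- ===== PORT B =====

-- dict lookup (first matching key), used for 'res[idx]' / 'idx in res'
def pvLookup {α : Type} (k : Nat) : List (Nat × α) → Option α
  | [] => none
  | p :: rest => if p.1 = k then some p.2 else pvLookup k rest

def pvHorner (base : Int) (coin : List Int) : Int :=
  coin.foldl (fun n b => n * base + (if b = 1 then 1 else 0)) 0

-- first pass of Source B: res (dict as assoc list) for even values, worklist for odd ones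
def pvInit (coin : List Int) : List (Nat × Int) × List (Nat × Int × Int) :=
  (List.range 9).foldl
    (fun (st : List (Nat × Int) × List (Nat × Int × Int)) (idx : Nat) =>
      let num := pvHorner ((idx : Int) + 2) coin
      if PySem.Int.mod num 2 = 0 then (st.1 ++ [(idx, (2 : Int))], st.2)
      else (st.1, st.2 ++ [(idx, num, pyFloatSqrtFloor num)]))
    (([], []) : List (Nat × Int) × List (Nat × Int × Int))

-- body of Source B's inner 'for idx, num, r in pending'
def pvStep (d : Int) (st : List (Nat × Int) × List (Nat × Int × Int)) (it : Nat × Int × Int) :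
    List (Nat × Int) × List (Nat × Int × Int) :=
  if it.2.2 < d then st
  else if PySem.Int.mod it.2.1 d = 0 then (st.1 ++ [(it.1, d)], st.2)
  else (st.1, st.2 ++ [it])

def pvResolve (d : Int) (it : Nat × Int × Int) : Option (Nat × Int) :=
  if it.2.2 < d then none
  else if PySem.Int.mod it.2.1 d = 0 then some (it.1, d) else none

def pvKeep (d : Int) (it : Nat × Int × Int) : Bool :=
  decide (¬ it.2.2 < d ∧ ¬ PySem.Int.mod it.2.1 d = 0)

-- characterisation of one inner pass (also used for termination of pvScan)
lemma pvStep_foldl (d : Int) :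
    ∀ (pend : List (Nat × Int × Int)) (res : List (Nat × Int)) (acc : List (Nat × Int × Int)),
      pend.foldl (pvStep d) (res, acc)
        = (res ++ pend.filterMap (pvResolve d), acc ++ pend.filter (pvKeep d)) := by
  intro pend
  induction pend with
  | nil => intro res acc; simp
  | cons it rest ih =>
    intro res acc
    simp only [List.foldl_cons]
    by_cases h1 : it.2.2 < d
    · simp [pvStep, pvResolve, pvKeep, h1, ih]
    · by_cases h2 : PySem.Int.mod it.2.1 d = 0
      · simp [pvStep, pvResolve, pvKeep, h1, h2, ih]
      · simp [pvStep, pvResolve, pvKeep, h1, h2, ih]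

def pvMaxR (l : List (Nat × Int × Int)) : Int :=
  l.foldr (fun it a => max it.2.2 a) 0

lemma pvMaxR_nonneg (l : List (Nat × Int × Int)) : 0 ≤ pvMaxR l := by
  induction l with
  | nil => simp [pvMaxR]
  | cons it rest ih => simp only [pvMaxR, List.foldr_cons] at *; omega

lemma le_pvMaxR {l : List (Nat × Int × Int)} {it : Nat × Int × Int} (h : it ∈ l) :
    it.2.2 ≤ pvMaxR l := by
  induction l with
  | nil => cases h
  | cons x rest ih =>
    rcases List.mem_cons.mp h with h | h
    · subst h; simp only [pvMaxR, List.foldr_cons]; omega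
    · have := ih h; simp only [pvMaxR, List.foldr_cons] at *; omega

lemma pvMaxR_filter_le (p : Nat × Int × Int → Bool) (l : List (Nat × Int × Int)) :
    pvMaxR (l.filter p) ≤ pvMaxR l := by
  induction l with
  | nil => simp
  | cons it rest ih =>
    by_cases h : p it
    · simp only [pvMaxR, List.filter_cons_of_pos h, List.foldr_cons] at *; omega
    · simp only [pvMaxR, List.filter_cons_of_neg h, List.foldr_cons] at *; omega

-- Source B's 'while pending' loop
def pvScan (res : List (Nat × Int)) (pending : List (Nat × Int × Int)) (d : Int) :
    List (Nat × Int) :=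
  if pending = [] then res
  else
    pvScan (pending.foldl (pvStep d) (res, [])).1 (pending.foldl (pvStep d) (res, [])).2 (d + 2)
termination_by (pvMaxR pending + 2 - d).toNat + pending.length
decreasing_by
  rename_i hne
  simp only [List.foldl_attach, pvStep_foldl, List.nil_append]
  have hmn : 0 ≤ pvMaxR pending := pvMaxR_nonneg pending
  have hmn' : 0 ≤ pvMaxR (pending.filter (pvKeep d)) := pvMaxR_nonneg _
  have hle : pvMaxR (pending.filter (pvKeep d)) ≤ pvMaxR pending := pvMaxR_filter_le _ _
  have hlen : (pending.filter (pvKeep d)).length ≤ pending.length :=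
    List.length_filter_le _ _
  have hlen1 : 1 ≤ pending.length := by
    cases pending with
    | nil => exact absurd rfl hne
    | cons a l => simp only [List.length_cons]; omega
  by_cases hF : pending.filter (pvKeep d) = []
  · rw [hF]
    have hz : pvMaxR ([] : List (Nat × Int × Int)) = (0 : Int) := rfl
    rw [hz]
    simp only [List.length_nil]
    omega
  · have hd : d ≤ pvMaxR (pending.filter (pvKeep d)) := by
      obtain ⟨it, hit⟩ := List.exists_mem_of_ne_nil _ hF
      have h1 := le_pvMaxR hit
      have h2 := List.of_mem_filter hit
      simp only [pvKeep, decide_eq_true_eq] at h2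
      omega
    omega

def get_nontrivial_alt (coin : List Int) : List Int :=
  let st := pvInit coin
  let final := pvScan st.1 st.2 3
  (List.range 9).filterMap (fun idx => pvLookup idx final)

-- ===== PRECONDITION & SPEC =====
-- the integer a coin denotes in base b (stated independently of the ports)
def pvCoinVal (b : Int) (coin : List Int) : Int :=
  coin.foldl (fun a x => a * b + (if x = 1 then 1 else 0)) 0

-- 2^1024 - 2^970, the smallest integer whose float conversion overflows
def pvFloatMax : Int := 179769313486231580793728971405303415079934132710037826936173778980444968292764750946649017977587207096330286416692887910946555547851940402630657488671505820681908902000708383676273854845817711531764475730270069855571366959622842914819860834936475292719074168444365510704342711559699508093042880177904174497792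

-- Pre_ excludes exactly the inputs on which A raises: when some base interpretation is odd and
-- ≥ 2^1024 - 2^970 (the float-conversion overflow threshold), math.sqrt raises OverflowError
-- (even interpretations never reach math.sqrt); everywhere else A returns normally.
def Pre_get_nontrivial (coin : List Int) : Prop :=
  ∀ b ∈ ([2, 3, 4, 5, 6, 7, 8, 9, 10] : List Int),
    PySem.Int.mod (pvCoinVal b coin) 2 = 0 ∨ pvCoinVal b coin < pvFloatMax
instance (coin : List Int) : Decidable (Pre_get_nontrivial coin) := by
  unfold Pre_get_nontrivial; infer_instance
def pvWitness_get_nontrivial : List Int := [1, 0, 1, 1]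

def Spec_get_nontrivial (coin : List Int) (out : List Int) : Prop := out = get_nontrivial_alt coin
instance (coin : List Int) (out : List Int) : Decidable (Spec_get_nontrivial coin out) := by unfold Spec_get_nontrivial; infer_instance

-- ===== CLAIM (what is proved, stated in full; the proofs are below) =====
def Claim_equal_get_nontrivial : Prop := ∀ (coin : List Int), Dom_get_nontrivial coin → Pre_get_nontrivial coin → Spec_get_nontrivial coin (get_nontrivial coin)

-- ===== LEMMAS AND PROOFS =====

-- the per-base inner search both sides boil down to
def pvSolo (num : Int) : Option Int :=
  (PySem.List.pyRange 3 (pyFloatSqrtFloor num + 1) 2).find? (fun i => PySem.Int.mod num i == 0)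

lemma pv_pyRange_pos_nil (a b s : Int) (hs : 0 < s) (h : b ≤ a) :
    PySem.List.pyRange a b s = [] := by
  rw [PySem.List.pyRange_of_pos a b hs, if_neg (by omega)]
  simp

lemma pv_pyRange_pos_cons (a b s : Int) (hs : 0 < s) (h : a < b) :
    PySem.List.pyRange a b s = a :: PySem.List.pyRange (a + s) b s := by
  rw [PySem.List.pyRange_of_pos a b hs, PySem.List.pyRange_of_pos (a+s) b hs,
      if_pos h]
  have key : (b - a + s - 1) / s = (b - a - 1) / s + 1 := by
    have := Int.add_mul_ediv_right (b - a - 1) 1 hs.ne'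
    rw [one_mul] at this
    rw [← this]; ring_nf
  by_cases h2 : a + s < b
  · rw [if_pos h2]
    have hn : ((b - a + s - 1) / s).toNat = ((b - (a+s) + s - 1) / s).toNat + 1 := by
      rw [key]
      have h0 : 0 ≤ (b - a - 1) / s := Int.ediv_nonneg (by omega) (by omega)
      have : b - (a+s) + s - 1 = b - a - 1 := by ring
      rw [this]; omega
    rw [hn, List.range_succ_eq_map, List.map_cons, List.map_map]
    congr 1
    · simp
    · apply List.map_congr_left
      intro k _
      simp [Function.comp]
      ring
  · rw [if_neg h2]
    have hz : (b - a - 1) / s = 0 := Int.ediv_eq_zero_of_lt (by omega) (by omega)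
    have : ((b - a + s - 1) / s).toNat = 1 := by rw [key, hz]; rfl
    rw [this]
    simp

lemma pv_horner_acc (base : Int) :
    ∀ (xs : List Int) (a : Int),
      xs.foldl (fun n b => n * base + (if b = 1 then 1 else 0)) a
        = a * base ^ xs.length + xs.foldl (fun n b => n * base + (if b = 1 then 1 else 0)) 0 := by
  intro xs
  induction xs with
  | nil => intro a; simp
  | cons x xs ih =>
    intro a
    simp only [List.foldl_cons, List.length_cons]
    rw [ih (a * base + _), ih (0 * base + _)]
    ring

lemma pv_num_eq (base : Int) (coin : List Int) :
    num_from_base base coin = pvHorner base coin := by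
  unfold pvHorner
  induction coin with
  | nil => rfl
  | cons x xs ih =>
    simp only [List.reverse_cons, num_from_base] at *
    rw [PySem.List.enumerate_append, List.foldl_append, ih]
    simp only [PySem.List.enumerate_cons, PySem.List.enumerate_nil, List.length_reverse,
      List.foldl_cons, List.foldl_nil, List.foldl_cons]
    rw [pv_horner_acc base xs (0 * base + (if x = 1 then 1 else 0))]
    by_cases hx : x = 1
    · simp [hx]; ring
    · simp [hx]

-- A as a flatMap over the bases
lemma pv_foldl_flatMap {α β : Type} (f : List α → β → List α) (g : β → List α)
    (h : ∀ acc b, f acc b = acc ++ g b) :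
    ∀ (l : List β) (acc : List α), l.foldl f acc = acc ++ l.flatMap g := by
  intro l
  induction l with
  | nil => intro acc; simp
  | cons b rest ih =>
    intro acc
    rw [List.foldl_cons, h, ih, List.flatMap_cons, List.append_assoc]

lemma pvA_flat (coin : List Int) :
    get_nontrivial coin
      = pvBases.flatMap (fun base =>
          let num := num_from_base base coin
          if PySem.Int.mod num 2 = 0 then [2] else (pvSolo num).toList) := by
  unfold get_nontrivial
  rw [pv_foldl_flatMap _ _ ?_ pvBases []]
  · rw [List.nil_append]
  · intro acc b
    show (let num := num_from_base b coin
          if PySem.Int.mod num 2 = 0 then acc ++ [2]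
          else
            match (PySem.List.pyRange 3 (pyFloatSqrtFloor num + 1) 2).find?
                    (fun i => PySem.Int.mod num i == 0) with
            | some i => acc ++ [i]
            | none => acc) = _
    by_cases h2 : PySem.Int.mod (num_from_base b coin) 2 = 0
    · simp only [if_pos h2]
    · simp only [if_neg h2, pvSolo]
      cases hf : (PySem.List.pyRange 3 (pyFloatSqrtFloor (num_from_base b coin) + 1) 2).find?
          (fun i => PySem.Int.mod (num_from_base b coin) i == 0) with
      | none => simp
      | some i => simp

-- first pass of B as two filterMaps over range 9
def pvGE (coin : List Int) (idx : Nat) : Option (Nat × Int) :=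
  if PySem.Int.mod (pvHorner ((idx : Int) + 2) coin) 2 = 0 then some (idx, 2) else none

def pvGO (coin : List Int) (idx : Nat) : Option (Nat × Int × Int) :=
  let num := pvHorner ((idx : Int) + 2) coin
  if PySem.Int.mod num 2 = 0 then none else some (idx, num, pyFloatSqrtFloor num)

lemma pvInit_eq (coin : List Int) :
    pvInit coin = ((List.range 9).filterMap (pvGE coin), (List.range 9).filterMap (pvGO coin)) := by
  unfold pvInit
  suffices H : ∀ (l : List Nat) (r : List (Nat × Int)) (a : List (Nat × Int × Int)),
      l.foldl (fun (st : List (Nat × Int) × List (Nat × Int × Int)) (idx : Nat) =>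
        let num := pvHorner ((idx : Int) + 2) coin
        if PySem.Int.mod num 2 = 0 then (st.1 ++ [(idx, (2 : Int))], st.2)
        else (st.1, st.2 ++ [(idx, num, pyFloatSqrtFloor num)])) (r, a)
        = (r ++ l.filterMap (pvGE coin), a ++ l.filterMap (pvGO coin)) by
    simpa using H (List.range 9) [] []
  intro l
  induction l with
  | nil => intro r a; simp
  | cons i rest ih =>
    intro r a
    by_cases h : PySem.Int.mod (pvHorner ((i : Int) + 2) coin) 2 = 0
    · have hge : pvGE coin i = some (i, 2) := by unfold pvGE; rw [if_pos h]
      have hgo : pvGO coin i = none := by simp only [pvGO]; rw [if_pos h]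
      simp only [List.foldl_cons, List.filterMap_cons, hge, hgo]
      rw [if_pos h, ih]
      simp only [List.append_assoc, List.singleton_append]
    · have hge : pvGE coin i = none := by unfold pvGE; rw [if_neg h]
      have hgo : pvGO coin i = some (i, pvHorner ((i : Int) + 2) coin,
          pyFloatSqrtFloor (pvHorner ((i : Int) + 2) coin)) := by
        simp only [pvGO]; rw [if_neg h]
      simp only [List.foldl_cons, List.filterMap_cons, hge, hgo]
      rw [if_neg h, ih]
      simp only [List.append_assoc, List.singleton_append]

-- lookup facts
lemma pv_lookup_eq_none {α : Type} (l : List (Nat × α)) (k : Nat)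
    (h : ∀ p ∈ l, p.1 ≠ k) : pvLookup k l = none := by
  induction l with
  | nil => rfl
  | cons p rest ih =>
    have hp : p.1 ≠ k := h p (List.mem_cons_self)
    simp only [pvLookup, if_neg hp]
    exact ih (fun q hq => h q (List.mem_cons_of_mem _ hq))

lemma pv_lookup_append {α : Type} (l₁ l₂ : List (Nat × α)) (k : Nat) :
    pvLookup k (l₁ ++ l₂) = ((pvLookup k l₁).or (pvLookup k l₂)) := by
  induction l₁ with
  | nil => simp [pvLookup]
  | cons p rest ih =>
    simp only [List.cons_append, pvLookup]
    by_cases h : p.1 = k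
    · simp [h]
    · simp [h, ih]

-- keys of a key-faithful filterMap
lemma pv_mem_filterMap_key {α : Type} (g : Nat → Option (Nat × α))
    (hg : ∀ i x, g i = some x → x.1 = i) (l : List Nat) (p : Nat × α)
    (hp : p ∈ l.filterMap g) : p.1 ∈ l := by
  obtain ⟨i, hi, hgi⟩ := List.mem_filterMap.mp hp
  rw [hg i p hgi]; exact hi

lemma pv_lookup_filterMap {α : Type} (g : Nat → Option (Nat × α))
    (hg : ∀ i x, g i = some x → x.1 = i) :
    ∀ (l : List Nat), l.Nodup → ∀ k ∈ l, pvLookup k (l.filterMap g) = (g k).map Prod.snd := by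
  intro l
  induction l with
  | nil => intro _ k hk; cases hk
  | cons i rest ih =>
    intro hnd k hk
    have hnd' := hnd.of_cons
    have hni : i ∉ rest := (List.nodup_cons.mp hnd).1
    rcases List.mem_cons.mp hk with rfl | hk
    · cases hgk : g k with
      | none =>
        simp only [List.filterMap_cons, hgk]
        rw [pv_lookup_eq_none]
        · rfl
        · intro p hp
          have := pv_mem_filterMap_key g hg rest p hp
          intro he; rw [he] at this; exact hni this
      | some x =>
        have hx := hg k x hgk
        simp only [List.filterMap_cons, hgk, pvLookup, if_pos hx]
        rfl
    · have hki : k ≠ i := fun he => hni (he ▸ hk)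
      cases hgi : g i with
      | none => simpa only [List.filterMap_cons, hgi] using ih hnd' k hk
      | some x =>
        have hx := hg i x hgi
        simp only [List.filterMap_cons, hgi, pvLookup]
        rw [if_neg (by rw [hx]; exact fun h => hki h.symm)]
        exact ih hnd' k hk

-- the unique-key fact used inside the scan
lemma pv_mem_eq_of_nodup_keys {α : Type} :
    ∀ (l : List (Nat × α)), (l.map Prod.fst).Nodup →
      ∀ p q, p ∈ l → q ∈ l → p.1 = q.1 → p = q := by
  intro l
  induction l with
  | nil => intro _ p q hp; cases hp
  | cons x rest ih =>
    intro hnd p q hp hq hpq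
    have hnx : x.1 ∉ rest.map Prod.fst := by
      simpa using (List.nodup_cons.mp hnd).1
    have hnd' := (List.nodup_cons.mp hnd).2
    rcases List.mem_cons.mp hp with hp1 | hp1 <;> rcases List.mem_cons.mp hq with hq1 | hq1
    · rw [hp1, hq1]
    · exact absurd (by rw [← hp1, hpq]; exact List.mem_map_of_mem hq1) hnx
    · exact absurd (by rw [← hq1, ← hpq]; exact List.mem_map_of_mem hp1) hnx
    · exact ih hnd' p q hp1 hq1 hpq

-- scan only appends to res: existing bindings survive
lemma pvScan_preserve :
    ∀ (res : List (Nat × Int)) (pending : List (Nat × Int × Int)) (d : Int) (k : Nat) (v : Int),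
      pvLookup k res = some v → pvLookup k (pvScan res pending d) = some v := by
  intro res pending d
  induction res, pending, d using pvScan.induct with
  | case1 res d => intro k v h; rw [pvScan]; simpa using h
  | case2 res pending d hne ih =>
    intro k v h
    rw [pvScan, if_neg hne]
    simp only [List.foldl_attach, pvStep_foldl, List.nil_append] at ih ⊢
    apply ih
    rw [pv_lookup_append, h]
    rfl

lemma pvScan_none :
    ∀ (res : List (Nat × Int)) (pending : List (Nat × Int × Int)) (d : Int) (k : Nat),
      (∀ p ∈ res, p.1 ≠ k) → (∀ it ∈ pending, it.1 ≠ k) →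
      pvLookup k (pvScan res pending d) = none := by
  intro res pending d
  induction res, pending, d using pvScan.induct with
  | case1 res d => intro k h _; rw [pvScan, if_pos rfl]; exact pv_lookup_eq_none _ _ h
  | case2 res pending d hne ih =>
    intro k hres hpend
    rw [pvScan, if_neg hne]
    simp only [List.foldl_attach, pvStep_foldl, List.nil_append] at ih ⊢
    apply ih
    · intro p hp
      rcases List.mem_append.mp hp with hp | hp
      · exact hres p hp
      · obtain ⟨it, hit, hr⟩ := List.mem_filterMap.mp hp
        have : p.1 = it.1 := by
          unfold pvResolve at hr
          split_ifs at hr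
          · cases hr; rfl
        rw [this]; exact hpend it hit
    · intro it hit
      exact hpend it (List.mem_of_mem_filter hit)

-- the heart: for an unresolved item the shared scan computes exactly the per-item search
lemma pvScan_lookup :
    ∀ (res : List (Nat × Int)) (pending : List (Nat × Int × Int)) (d : Int)
      (idx : Nat) (n r : Int),
      (idx, n, r) ∈ pending →
      (pending.map Prod.fst).Nodup →
      (∀ p ∈ res, p.1 ≠ idx) →
      pvLookup idx (pvScan res pending d)
        = (PySem.List.pyRange d (r + 1) 2).find? (fun i => PySem.Int.mod n i == 0) := by
  intro res pending d
  induction res, pending, d using pvScan.induct with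
  | case1 res d => intro idx n r hmem; cases hmem
  | case2 res pending d hne ih =>
    intro idx n r hmem hnd hres
    have huniq : ∀ it ∈ pending, it.1 = idx → it = (idx, n, r) :=
      fun it hit h1 => pv_mem_eq_of_nodup_keys pending hnd it (idx, n, r) hit hmem h1
    rw [pvScan, if_neg hne]
    simp only [List.foldl_attach, pvStep_foldl, List.nil_append] at ih ⊢
    by_cases hdr : r < d
    · -- exhausted: item dropped, never resolved
      rw [pv_pyRange_pos_nil d (r + 1) 2 (by omega) (by omega)]
      have hsc := pvScan_none (res ++ pending.filterMap (pvResolve d))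
        (pending.filter (pvKeep d)) (d + 2) idx ?_ ?_
      · exact hsc
      · intro p hp
        rcases List.mem_append.mp hp with hp | hp
        · exact hres p hp
        · obtain ⟨it, hit, hr⟩ := List.mem_filterMap.mp hp
          intro hpi
          have hiti : it.1 = idx := by
            unfold pvResolve at hr
            split_ifs at hr
            · cases hr; simpa using hpi
          have := huniq it hit hiti
          rw [this] at hr
          unfold pvResolve at hr
          rw [if_pos (by simpa using hdr)] at hr
          cases hr
      · intro it hit hiti
        have hmf := List.mem_of_mem_filter hit
        have := huniq it hmf hiti
        have hk := List.of_mem_filter hit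
        rw [this] at hk
        simp only [pvKeep, decide_eq_true_eq] at hk
        exact hk.1 (by simpa using hdr)
    · rw [pv_pyRange_pos_cons d (r + 1) 2 (by omega) (by omega)]
      by_cases hdiv : PySem.Int.mod n d = 0
      · -- resolved at d
        rw [List.find?_cons_of_pos (by simpa using hdiv)]
        apply pvScan_preserve
        rw [pv_lookup_append, pv_lookup_eq_none res idx hres]
        have H : ∀ (l : List (Nat × Int × Int)),
            (∀ it ∈ l, it ∈ pending) → (idx, n, r) ∈ l →
            pvLookup idx (l.filterMap (pvResolve d)) = some d := by
          intro l
          induction l with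
          | nil => intro _ hm; cases hm
          | cons it rest ihl =>
            intro hsub hm
            by_cases hiti : it.1 = idx
            · have heq := huniq it (hsub it List.mem_cons_self) hiti
              subst heq
              simp only [List.filterMap_cons, pvResolve]
              rw [if_neg (by simp; omega), if_pos hdiv]
              simp [pvLookup]
            · have hm2 : (idx, n, r) ∈ rest := by
                rcases List.mem_cons.mp hm with he | hm2
                · exact absurd (by rw [← he]) hiti
                · exact hm2
              have hrec := ihl (fun x hx => hsub x (List.mem_cons_of_mem _ hx)) hm2
              cases hr2 : pvResolve d it with
              | none => simpa only [List.filterMap_cons, hr2] using hrec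
              | some p =>
                have hpi : p.1 = it.1 := by
                  unfold pvResolve at hr2
                  split_ifs at hr2
                  · cases hr2; rfl
                simp only [List.filterMap_cons, hr2, pvLookup]
                rw [if_neg (by rw [hpi]; exact hiti)]
                exact hrec
        rw [H pending (fun _ h => h) hmem]
        rfl
      · -- not resolved: survives into the next round
        rw [List.find?_cons_of_neg (by simpa using hdiv)]
        apply ih
        · exact List.mem_filter.mpr ⟨hmem, by simp [pvKeep, hdiv]; omega⟩
        · exact (List.Sublist.map Prod.fst List.filter_sublist).nodup hnd
        · intro p hp
          rcases List.mem_append.mp hp with hp | hp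
          · exact hres p hp
          · obtain ⟨it, hit, hr2⟩ := List.mem_filterMap.mp hp
            intro hpi
            have hiti : it.1 = idx := by
              unfold pvResolve at hr2
              split_ifs at hr2
              · cases hr2; simpa using hpi
            have := huniq it hit hiti
            rw [this] at hr2
            unfold pvResolve at hr2
            rw [if_neg (by omega), if_neg hdiv] at hr2
            cases hr2

-- key-faithfulness of the two generators
lemma pvGE_key (coin : List Int) : ∀ i x, pvGE coin i = some x → x.1 = i := by
  intro i x h
  unfold pvGE at h
  split_ifs at h
  · cases h; rfl

lemma pvGO_key (coin : List Int) : ∀ i x, pvGO coin i = some x → x.1 = i := by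
  intro i x h
  simp only [pvGO] at h
  split_ifs at h
  · cases h; rfl

lemma pv_keys_filterMap_sublist {α : Type} (g : Nat → Option (Nat × α))
    (hg : ∀ i x, g i = some x → x.1 = i) :
    ∀ (l : List Nat), ((l.filterMap g).map Prod.fst).Sublist l := by
  intro l
  induction l with
  | nil => simp
  | cons i rest ih =>
    cases hgi : g i with
    | none =>
      simp only [List.filterMap_cons, hgi]
      exact ih.cons i
    | some x =>
      simp only [List.filterMap_cons, hgi, List.map_cons, hg i x hgi]
      exact ih.cons₂ i

-- what B's final dict holds for each base index
lemma pv_final_lookup (coin : List Int) (idx : Nat) (hidx : idx ∈ List.range 9) :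
    pvLookup idx (pvScan ((List.range 9).filterMap (pvGE coin))
        ((List.range 9).filterMap (pvGO coin)) 3)
      = (if PySem.Int.mod (pvHorner ((idx : Int) + 2) coin) 2 = 0 then some 2
         else pvSolo (pvHorner ((idx : Int) + 2) coin)) := by
  by_cases h : PySem.Int.mod (pvHorner ((idx : Int) + 2) coin) 2 = 0
  · rw [if_pos h]
    apply pvScan_preserve
    rw [pv_lookup_filterMap (pvGE coin) (pvGE_key coin) (List.range 9) (List.nodup_range) idx hidx]
    unfold pvGE
    rw [if_pos h]
    rfl
  · rw [if_neg h]
    have hmem : (idx, pvHorner ((idx : Int) + 2) coin,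
        pyFloatSqrtFloor (pvHorner ((idx : Int) + 2) coin)) ∈ (List.range 9).filterMap (pvGO coin) := by
      refine List.mem_filterMap.mpr ⟨idx, hidx, ?_⟩
      simp only [pvGO]
      rw [if_neg h]
    have hnd : (((List.range 9).filterMap (pvGO coin)).map Prod.fst).Nodup :=
      (pv_keys_filterMap_sublist (pvGO coin) (pvGO_key coin) (List.range 9)).nodup
        (List.nodup_range)
    have hres : ∀ p ∈ (List.range 9).filterMap (pvGE coin), p.1 ≠ idx := by
      intro p hp hpi
      obtain ⟨i, _, hgi⟩ := List.mem_filterMap.mp hp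
      have : i = idx := by rw [← pvGE_key coin i p hgi, hpi]
      rw [this] at hgi
      unfold pvGE at hgi
      rw [if_neg h] at hgi
      cases hgi
    exact pvScan_lookup _ _ 3 idx _ _ hmem hnd hres

-- ===== VERDICT (by name: the statement is the Claim_ definition above) =====
theorem get_nontrivial_spec : Claim_equal_get_nontrivial := by
  intro coin _ _
  unfold Spec_get_nontrivial
  have hB : get_nontrivial_alt coin
      = (List.range 9).filterMap (fun idx =>
          pvLookup idx (pvScan ((List.range 9).filterMap (pvGE coin))
            ((List.range 9).filterMap (pvGO coin)) 3)) := by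
    show (List.range 9).filterMap (fun idx =>
        pvLookup idx (pvScan (pvInit coin).1 (pvInit coin).2 3)) = _
    rw [pvInit_eq]
  rw [pvA_flat, hB,
    List.filterMap_congr (fun idx hidx => pv_final_lookup coin idx hidx),
    List.filterMap_eq_flatMap_toList]
  have hb : pvBases = (List.range 9).map (fun i : Nat => ((i : Int) + 2)) := by decide
  rw [hb, List.flatMap_map (fun i : Nat => (i : Int) + 2)
    (fun base =>
      let num := num_from_base base coin
      if PySem.Int.mod num 2 = 0 then [2] else (pvSolo num).toList) (List.range 9)]
  apply List.flatMap_congr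
  intro i _
  show (let num := num_from_base ((i : Int) + 2) coin
        if PySem.Int.mod num 2 = 0 then [2] else (pvSolo num).toList) = _
  simp only [pv_num_eq]
  by_cases h : PySem.Int.mod (pvHorner ((i : Int) + 2) coin) 2 = 0
  · rw [if_pos h, if_pos h]
    rfl
  · rw [if_neg h, if_neg h]
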